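-- pv_equiv track=rewrite | github.com/jonathanMLDev/cppa-unified-dashboard_01 | ExtractEmails/process_mailing_lists.py | group_emails_by_person
-- ===== SOURCE A (Python) =====
-- from collections import defaultdict
--
-- def normalize_name(name: str) -> str:
--     """
--     Normalize a name for comparison.
--     Removes extra spaces, handles case variations.
--
--     Args:
--         name: Name to normalize
--
--     Returns:
--         Normalized name
--     """
--     # Remove extra whitespace
--     name = " ".join(name.split())
--     return name
--
-- def group_emails_by_person(all_pairs: list[dict]) -> dict:
--     """
--     Group emails by person name.
--     One person can have multiple emails.
--
--     Args:
--         all_pairs: List of name-email pair dictionaries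
--
--     Returns:
--         Dictionary mapping normalized names to their email list
--     """
--     # Use defaultdict to group emails by name
--     person_emails = defaultdict(set)
--     # Keep original name format (for display)
--     name_display = {}
--
--     for pair in all_pairs:
--         name = pair["name"]
--         email = pair["email"]
--
--         # Normalize name for grouping
--         normalized_name = normalize_name(name)
--
--         # Add email to this person's set
--         person_emails[normalized_name].add(email)
--
--         # Keep the first occurrence's name format for display
--         if normalized_name not in name_display:
--             name_display[normalized_name] = name
--
--     # Convert to final format
--     result = {}
--     for norm_name, emails in person_emails.items():
--         display_name = name_display[norm_name]
--         result[display_name] = sorted(list(emails))  # Sort emails for consistency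
--
--     return result
-- ===== SOURCE B (Python) =====
-- def normalize_name(name: str) -> str:
--     return " ".join(name.split())
--
-- def group_emails_by_person(all_pairs: list[dict]) -> dict:
--     # First-occurrence scan: for each pair whose normalized name was not seen
--     # before, collect that person's whole email group by one filtering pass
--     # over the full list (no grouping dict is maintained).
--     norms = [normalize_name(pair["name"]) for pair in all_pairs]
--     result = {}
--     seen = set()
--     for pair, n in zip(all_pairs, norms):
--         if n in seen:
--             continue
--         seen.add(n)
--         emails = {q["email"] for q, m in zip(all_pairs, norms) if m == n}
--         result[pair["name"]] = sorted(emails)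
--     return result
-- ===== Notes on version B (the rewrite author's own statement) =====
-- stated objective: alternative
-- what changed: A groups in one pass with a defaultdict(set) plus a separate display-name dict; B keeps no grouping structure at all: it scans for first occurrences of each normalized name and recollects that person's whole email set by a filtering pass over the full list.
import Mathlib
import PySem

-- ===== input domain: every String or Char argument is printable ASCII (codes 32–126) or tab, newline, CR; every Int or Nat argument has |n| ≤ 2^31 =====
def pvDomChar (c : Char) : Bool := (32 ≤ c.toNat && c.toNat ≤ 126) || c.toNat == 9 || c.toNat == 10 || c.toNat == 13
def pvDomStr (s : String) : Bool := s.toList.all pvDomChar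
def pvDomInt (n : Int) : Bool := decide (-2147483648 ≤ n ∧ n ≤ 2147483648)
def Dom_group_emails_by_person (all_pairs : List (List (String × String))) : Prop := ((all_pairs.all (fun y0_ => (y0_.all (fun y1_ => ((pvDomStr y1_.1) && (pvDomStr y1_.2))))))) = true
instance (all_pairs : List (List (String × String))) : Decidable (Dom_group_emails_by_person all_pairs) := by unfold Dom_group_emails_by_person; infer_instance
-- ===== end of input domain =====

-- B replaces A's one-pass defaultdict/display-dict grouping by a first-occurrence scan that
-- recollects each person's whole email group with a filtering pass over the full list
-- (objective: alternative structure, not speed). Equality proved on the returned value.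

-- ===== PORT A =====

-- " ".join(name.split())
def normalize_name (name : String) : String :=
  PySem.Str.join " " (PySem.Str.split₀ name)

-- pair[k]: Python dict subscript; a missing key is a KeyError, excluded by Pre_,
-- so the "" default is never the value used on admitted inputs.
def pvLookup (pair : List (String × String)) (k : String) : String :=
  ((PySem.Dict.ofList pair).get? k).getD ""

-- person_emails[normalized_name].add(email)   (defaultdict(set))
def aStepPE (d : PySem.Dict String (PySem.Set String)) (pair : List (String × String)) :
    PySem.Dict String (PySem.Set String) :=
  let name := pvLookup pair "name"
  let email := pvLookup pair "email"
  let normalized_name := normalize_name name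
  d.modify normalized_name PySem.Set.empty (fun s => PySem.Set.add s email)

-- if normalized_name not in name_display: name_display[normalized_name] = name
def aStepND (d : PySem.Dict String String) (pair : List (String × String)) :
    PySem.Dict String String :=
  let name := pvLookup pair "name"
  let normalized_name := normalize_name name
  if d.contains normalized_name then d else d.insert normalized_name name

def group_emails_by_person (all_pairs : List (List (String × String))) : List (String × List String) :=
  let st := all_pairs.foldl (fun st pair => (aStepPE st.1 pair, aStepND st.2 pair))
    ((PySem.Dict.empty : PySem.Dict String (PySem.Set String)),
     (PySem.Dict.empty : PySem.Dict String String))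
  -- for norm_name, emails in person_emails.items(): result[name_display[norm_name]] = sorted(list(emails))
  (st.1.items.foldl (fun r kv =>
      r.insert ((st.2.get? kv.1).getD "") (PySem.List.sorted kv.2 (fun x => x) false))
    (PySem.Dict.empty : PySem.Dict String (List String))).items

-- ===== PORT B =====

def group_emails_by_person_alt (all_pairs : List (List (String × String))) : List (String × List String) :=
  let norms := all_pairs.map (fun pair => normalize_name (pvLookup pair "name"))
  -- for pair, n in zip(all_pairs, norms): if n in seen: continue; seen.add(n);
  --   emails = {q["email"] for q, m in zip(all_pairs, norms) if m == n}; result[pair["name"]] = sorted(emails)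
  ((all_pairs.zip norms).foldl (fun st pn =>
      if PySem.Set.contains st.1 pn.2 then st
      else
        (PySem.Set.add st.1 pn.2,
         st.2.insert (pvLookup pn.1 "name")
           (PySem.List.sorted
             (PySem.Set.ofList (((all_pairs.zip norms).filter (fun qm => qm.2 == pn.2)).map
               (fun qm => pvLookup qm.1 "email")))
             (fun x => x) false)))
    ((PySem.Set.empty : PySem.Set String),
     (PySem.Dict.empty : PySem.Dict String (List String)))).2.items

-- ===== PRECONDITION & SPEC =====
-- Pre_ excludes exactly the pairs on which Python's pair["name"] / pair["email"] raises KeyError.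
def Pre_group_emails_by_person (all_pairs : List (List (String × String))) : Prop :=
  (all_pairs.all (fun pair =>
    pair.any (fun kv => kv.1 == "name") && pair.any (fun kv => kv.1 == "email"))) = true
instance (all_pairs : List (List (String × String))) : Decidable (Pre_group_emails_by_person all_pairs) := by
  unfold Pre_group_emails_by_person; infer_instance

def pvWitness_group_emails_by_person : (List (List (String × String))) :=
  [[("name", "Ann  Lee"), ("email", "a@x.org")],
   [("name", "Ann Lee"), ("email", "b@x.org")],
   [("name", "Bob"), ("email", "a@x.org")]]

def Spec_group_emails_by_person (all_pairs : List (List (String × String))) (out : List (String × List String)) : Prop := out = group_emails_by_person_alt all_pairs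
instance (all_pairs : List (List (String × String))) (out : List (String × List String)) : Decidable (Spec_group_emails_by_person all_pairs out) := by unfold Spec_group_emails_by_person; infer_instance

-- ===== CLAIM (what is proved, stated in full; the proofs are below) =====
def Claim_equal_group_emails_by_person : Prop := ∀ (all_pairs : List (List (String × String))), Dom_group_emails_by_person all_pairs → Pre_group_emails_by_person all_pairs → Spec_group_emails_by_person all_pairs (group_emails_by_person all_pairs)

-- ===== LEMMAS AND PROOFS =====

-- abbreviations for the proofs
def pvNm (pair : List (String × String)) : String := pvLookup pair "name"
def pvEm (pair : List (String × String)) : String := pvLookup pair "email"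
def pvKey (pair : List (String × String)) : String := normalize_name (pvLookup pair "name")

theorem aStepND_eq (d : PySem.Dict String String) (p : List (String × String)) :
    aStepND d p = if d.contains (pvKey p) then d else d.insert (pvKey p) (pvNm p) := rfl

theorem aStepPE_eq (d : PySem.Dict String (PySem.Set String)) (p : List (String × String)) :
    aStepPE d p = d.modify (pvKey p) PySem.Set.empty (fun s => PySem.Set.add s (pvEm p)) := rfl

-- the sub-list of pairs whose normalized name is a first occurrence (B's kept pairs)
def pvKept (seen : PySem.Set String) : List (List (String × String)) → List (List (String × String))
  | [] => []
  | p :: t =>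
    if PySem.Set.contains seen (pvKey p) then pvKept seen t
    else p :: pvKept (PySem.Set.add seen (pvKey p)) t

-- B's fold, with the value function abstracted
theorem alt_fold (E : String → List String) :
    ∀ (l : List (List (String × String))) (seen : PySem.Set String)
      (r : PySem.Dict String (List String)),
    (l.foldl (fun st p =>
        if PySem.Set.contains st.1 (pvKey p) then st
        else (PySem.Set.add st.1 (pvKey p), st.2.insert (pvNm p) (E (pvKey p)))) (seen, r)).2
    = (pvKept seen l).foldl (fun r p => r.insert (pvNm p) (E (pvKey p))) r := by
  intro l
  induction l with
  | nil => intro seen r; simp [pvKept]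
  | cons p t ih =>
    intro seen r
    rw [List.foldl_cons, pvKept]
    cases h : PySem.Set.contains seen (pvKey p) with
    | true => rw [if_pos rfl, if_pos rfl]; exact ih seen r
    | false =>
      rw [if_neg (by simp), if_neg (by simp), List.foldl_cons]
      dsimp only
      exact ih _ _

-- every kept pair's key was unseen
theorem kept_key_not_mem :
    ∀ (l : List (List (String × String))) (seen : PySem.Set String)
      (p : List (String × String)), p ∈ pvKept seen l → pvKey p ∉ seen := by
  intro l
  induction l with
  | nil => intro seen p hp; simp [pvKept] at hp
  | cons q t ih =>
    intro seen p hp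
    by_cases h : PySem.Set.contains seen (pvKey q) = true
    · rw [pvKept, if_pos h] at hp; exact ih seen p hp
    · rw [pvKept, if_neg h] at hp
      rcases List.mem_cons.mp hp with hp | hp
      · subst hp
        intro hmem
        exact h ((PySem.Set.contains_iff seen (pvKey p)).mpr hmem)
      · intro hmem
        exact ih _ p hp (((PySem.Set.mem_add seen (pvKey q) (pvKey p)).mpr (Or.inl hmem)))

-- a kept pair is the FIRST pair of l with its key
theorem kept_find? :
    ∀ (l : List (List (String × String))) (seen : PySem.Set String)
      (p : List (String × String)), p ∈ pvKept seen l →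
      l.find? (fun q => pvKey q == pvKey p) = some p := by
  intro l
  induction l with
  | nil => intro seen p hp; simp [pvKept] at hp
  | cons q t ih =>
    intro seen p hp
    by_cases h : PySem.Set.contains seen (pvKey q) = true
    · rw [pvKept, if_pos h] at hp
      have hne : pvKey q ≠ pvKey p := by
        intro he
        exact kept_key_not_mem t seen p hp (he ▸ (PySem.Set.contains_iff seen (pvKey q)).mp h)
      rw [List.find?_cons_of_neg (by simpa using hne), ih seen p hp]
    · rw [pvKept, if_neg h] at hp
      rcases List.mem_cons.mp hp with hp | hp
      · subst hp; rw [List.find?_cons_of_pos (by simp)]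
      · have hne : pvKey q ≠ pvKey p := by
          intro he
          exact kept_key_not_mem t _ p hp
            ((PySem.Set.mem_add seen (pvKey q) (pvKey p)).mpr (Or.inr he.symm))
        rw [List.find?_cons_of_neg (by simpa using hne), ih _ p hp]

-- the kept pairs' keys are the unseen part of set(norms), in first-occurrence order
theorem kept_map_key :
    ∀ (l : List (List (String × String))) (seen : PySem.Set String),
    (pvKept seen l).map pvKey
      = (PySem.Set.ofList (l.map pvKey)).filter (fun k => !(PySem.Set.contains seen k)) := by
  intro l
  induction l with
  | nil => intro seen; simp [pvKept, PySem.Set.ofList_nil]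
  | cons q t ih =>
    intro seen
    rw [List.map_cons, PySem.Set.ofList_cons]
    by_cases h : PySem.Set.contains seen (pvKey q) = true
    · have hm : pvKey q ∈ seen := (PySem.Set.contains_iff seen (pvKey q)).mp h
      rw [pvKept, if_pos h, ih seen, List.filter_cons_of_neg (by simp [hm]),
        PySem.Set.discard, List.filter_filter]
      apply List.filter_congr
      intro k _
      by_cases hk : k = pvKey q
      · subst hk; simp [hm]
      · simp [hk]
    · have hm : pvKey q ∉ seen := fun hx => h ((PySem.Set.contains_iff seen (pvKey q)).mpr hx)
      rw [pvKept, if_neg h, List.map_cons, ih,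
        List.filter_cons_of_pos (by simp [hm]), PySem.Set.discard, List.filter_filter]
      congr 1
      apply List.filter_congr
      intro k _
      by_cases hk : k = pvKey q
      · subst hk
        simp [PySem.Set.mem_add]
      · simp [PySem.Set.mem_add, hk]

-- A's name_display lookups: the first occurrence's raw name
theorem nd_get? :
    ∀ (l : List (List (String × String))) (d : PySem.Dict String String) (k : String),
    (l.foldl aStepND d).get? k
      = match d.get? k with
        | some v => some v
        | none => (l.find? (fun p => pvKey p == k)).map pvNm := by
  intro l
  induction l with
  | nil =>
    intro d k
    cases h : d.get? k <;> simp [h]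
  | cons p t ih =>
    intro d k
    rw [List.foldl_cons, aStepND_eq]
    by_cases hc : d.contains (pvKey p) = true
    · rw [if_pos hc, ih]
      by_cases hk : k = pvKey p
      · subst hk
        rcases h : d.get? (pvKey p) with _ | v
        · exact absurd ((PySem.Dict.get?_eq_none_iff_contains d (pvKey p)).mp h) (by simp [hc])
        · simp
      · rcases _h : d.get? k with _ | v
        · simp [List.find?_cons_of_neg (p := fun q => pvKey q == k) (by simpa using Ne.symm hk)]
        · simp
    · rw [if_neg hc, ih]
      by_cases hk : k = pvKey p
      · subst hk
        rw [PySem.Dict.get?_insert_self,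
          (PySem.Dict.get?_eq_none_iff_contains d (pvKey p)).mpr (by simpa using hc),
          List.find?_cons_of_pos (p := fun q => pvKey q == pvKey p) (by simp)]
        simp
      · rw [PySem.Dict.get?_insert_of_ne d _ hk]
        rcases _h : d.get? k with _ | v
        · simp [List.find?_cons_of_neg (p := fun q => pvKey q == k) (by simpa using Ne.symm hk)]
        · simp

-- A's person_emails lookups: all matching emails, deduplicated in encounter order
theorem pe_getD :
    ∀ (l : List (List (String × String))) (d : PySem.Dict String (PySem.Set String)) (k : String),
    (l.foldl aStepPE d).getD k PySem.Set.empty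
      = PySem.Set.update (d.getD k PySem.Set.empty) ((l.filter (fun p => pvKey p == k)).map pvEm) := by
  intro l
  induction l with
  | nil => intro d k; simp [PySem.Set.update_nil]
  | cons p t ih =>
    intro d k
    rw [List.foldl_cons, aStepPE_eq, ih]
    by_cases hk : k = pvKey p
    · subst hk
      rw [PySem.Dict.getD_modify, if_pos rfl, List.filter_cons_of_pos (by simp), List.map_cons,
        PySem.Set.update_cons]
    · rw [PySem.Dict.getD_modify, if_neg hk, List.filter_cons_of_neg (by simpa using Ne.symm hk)]

-- normalize_name is the identity on names A stores as display names: pvKey ∘ pvNm = pvKey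
theorem key_nm (p : List (String × String)) : normalize_name (pvNm p) = pvKey p := rfl

-- B's zip(all_pairs, norms) pairs each element with its key
theorem zip_norms (l : List (List (String × String))) :
    l.zip (l.map (fun pair => normalize_name (pvLookup pair "name")))
      = l.map (fun p => (p, pvKey p)) := by
  nth_rewrite 1 [show l = l.map id from (List.map_id l).symm]
  rw [List.zip_map']
  simp [pvKey]

-- B restated through the proof abbreviations (definitional)
theorem alt_eq (l : List (List (String × String))) :
    group_emails_by_person_alt l
      = ((l.zip (l.map (fun pair => normalize_name (pvLookup pair "name")))).foldl (fun st pn =>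
          if PySem.Set.contains st.1 pn.2 then st
          else
            (PySem.Set.add st.1 pn.2,
             st.2.insert (pvNm pn.1)
               (PySem.List.sorted
                 (PySem.Set.ofList
                   (((l.zip (l.map (fun pair => normalize_name (pvLookup pair "name")))).filter
                       (fun qm => qm.2 == pn.2)).map (fun qm => pvEm qm.1)))
                 (fun x => x) false)))
        ((PySem.Set.empty : PySem.Set String),
         (PySem.Dict.empty : PySem.Dict String (List String)))).2.items := rfl

-- the email-set expression B builds, simplified to A's filtered form
theorem emails_eq (l : List (List (String × String))) (n : String) :
    ((l.map (fun p => (p, pvKey p))).filter (fun qm => qm.2 == n)).map (fun qm => pvEm qm.1)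
      = (l.filter (fun p => pvKey p == n)).map pvEm := by
  rw [List.filter_map, List.map_map]
  rfl

-- the kept pairs' keys, with nothing pre-seen, are exactly set(norms)
theorem kept_keys (l : List (List (String × String))) :
    (pvKept PySem.Set.empty l).map pvKey = PySem.Set.ofList (l.map pvKey) := by
  rw [kept_map_key l PySem.Set.empty]
  simp

-- the kept pairs' raw names are pairwise distinct (their normalizations already are)
theorem nodup_kept_names (l : List (List (String × String))) :
    ((pvKept PySem.Set.empty l).map pvNm).Nodup := by
  apply List.Nodup.of_map normalize_name
  rw [List.map_map]
  have h : (pvKept PySem.Set.empty l).map (normalize_name ∘ pvNm)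
      = (pvKept PySem.Set.empty l).map pvKey := rfl
  rw [h, kept_keys]
  exact PySem.Set.nodup_ofList _

-- B's returned items
theorem alt_items (l : List (List (String × String))) :
    group_emails_by_person_alt l
      = (pvKept PySem.Set.empty l).map (fun p =>
          (pvNm p,
           PySem.List.sorted
             (PySem.Set.ofList ((l.filter (fun q => pvKey q == pvKey p)).map pvEm))
             (fun x => x) false)) := by
  rw [alt_eq, zip_norms, List.foldl_map]
  dsimp only
  rw [alt_fold (fun n => PySem.List.sorted
        (PySem.Set.ofList (((l.map (fun p => (p, pvKey p))).filter (fun qm => qm.2 == n)).map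
          (fun qm => pvEm qm.1))) (fun x => x) false) l PySem.Set.empty PySem.Dict.empty]
  rw [PySem.Dict.items_foldl_insert_fresh (pvKept PySem.Set.empty l) pvNm _ PySem.Dict.empty
      (fun a _ => by simp [PySem.Dict.contains_empty]) (nodup_kept_names l)]
  simp only [emails_eq]
  simp only [show (PySem.Dict.empty : PySem.Dict String (List String)).items = [] from rfl,
    List.nil_append]

-- the display name A looks up for a key k present in l
theorem disp_eq (l : List (List (String × String))) (k : String) :
    ((l.foldl aStepND PySem.Dict.empty).get? k)
      = (l.find? (fun p => pvKey p == k)).map pvNm := by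
  rw [nd_get?, PySem.Dict.get?_empty]

-- those display names are pairwise distinct (they renormalize to the distinct keys)
theorem nodup_disp (l : List (List (String × String))) :
    ((PySem.Set.ofList (l.map pvKey)).map
      (fun k => ((l.foldl aStepND PySem.Dict.empty).get? k).getD "")).Nodup := by
  apply List.Nodup.of_map normalize_name
  rw [List.map_map]
  have h : ∀ k ∈ PySem.Set.ofList (l.map pvKey),
      (normalize_name ∘ fun k => ((l.foldl aStepND PySem.Dict.empty).get? k).getD "") k = k := by
    intro k hk
    have hex : ∃ p ∈ l, pvKey p = k := by
      rcases List.mem_map.mp ((PySem.Set.mem_ofList (l.map pvKey) k).mp hk) with ⟨p, hp, he⟩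
      exact ⟨p, hp, he⟩
    rcases hex with ⟨p, hp, he⟩
    have hs : (l.find? (fun q => pvKey q == k)).isSome := by
      rw [List.find?_isSome]
      exact ⟨p, hp, by simp [he]⟩
    rcases Option.isSome_iff_exists.mp hs with ⟨q, hq⟩
    have hqk : pvKey q = k := by simpa using List.find?_some hq
    simp [disp_eq l k, hq, key_nm, hqk]
  rw [List.map_congr_left h]
  exact (List.map_id' _).symm ▸ PySem.Set.nodup_ofList (l.map pvKey)

-- A's returned items
theorem a_items (l : List (List (String × String))) :
    group_emails_by_person l
      = (PySem.Set.ofList (l.map pvKey)).map (fun k =>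
          (((l.foldl aStepND PySem.Dict.empty).get? k).getD "",
           PySem.List.sorted
             (PySem.Set.ofList ((l.filter (fun p => pvKey p == k)).map pvEm))
             (fun x => x) false)) := by
  unfold group_emails_by_person
  rw [PySem.List.foldl_prod_mk (f := aStepPE) (g := aStepND)]
  dsimp only
  have hstep : aStepPE = fun d p => d.modify (pvKey p) PySem.Set.empty
      (fun s => PySem.Set.add s (pvEm p)) := funext fun d => funext fun p => aStepPE_eq d p
  have hkeys : (l.foldl aStepPE PySem.Dict.empty).keys = PySem.Set.ofList (l.map pvKey) := by
    rw [hstep, PySem.Dict.keys_foldl_modify_key l pvKey PySem.Set.empty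
      (fun _ p => fun s => PySem.Set.add s (pvEm p))]
    simp [PySem.Set.update_nil_left, PySem.Dict.keys_empty]
  have hnodup : (l.foldl aStepPE PySem.Dict.empty).keys.Nodup := by
    rw [hkeys]; exact PySem.Set.nodup_ofList _
  rw [PySem.Dict.items_eq_map_keys _ hnodup PySem.Set.empty, hkeys, List.foldl_map]
  dsimp only
  have hV : ∀ k, (l.foldl aStepPE PySem.Dict.empty).getD k PySem.Set.empty
      = PySem.Set.ofList ((l.filter (fun p => pvKey p == k)).map pvEm) := fun k => by
    rw [pe_getD, PySem.Dict.getD_empty]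
    exact PySem.Set.update_nil_left _
  rw [PySem.Dict.items_foldl_insert_fresh (PySem.Set.ofList (l.map pvKey))
      (fun k => ((l.foldl aStepND PySem.Dict.empty).get? k).getD "")
      (fun k => PySem.List.sorted ((l.foldl aStepPE PySem.Dict.empty).getD k PySem.Set.empty)
        (fun x => x) false)
      PySem.Dict.empty (fun a _ => by simp [PySem.Dict.contains_empty]) (nodup_disp l)]
  simp only [hV]
  simp only [show (PySem.Dict.empty : PySem.Dict String (List String)).items = [] from rfl,
    List.nil_append]

-- ===== VERDICT (by name: the statement is the Claim_ definition above) =====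
theorem group_emails_by_person_spec : Claim_equal_group_emails_by_person := by
  intro l _ _
  unfold Spec_group_emails_by_person
  rw [a_items, alt_items, ← kept_keys, List.map_map]
  apply List.map_congr_left
  intro p hp
  have hf := kept_find? l PySem.Set.empty p hp
  have hex : ∃ q ∈ l, pvKey q = pvKey p := by
    rcases List.mem_of_find?_eq_some hf with hm
    exact ⟨p, hm, rfl⟩
  have hnd : (l.foldl aStepND PySem.Dict.empty).get? (pvKey p) = some (pvNm p) := by
    rw [disp_eq l (pvKey p), hf]; rfl
  simp [hnd]
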